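-- pv_equiv track=rewrite | github.com/kesrisk/practice | shivam/Sorting and Searching/Concert Tickets.py | ticket
-- ===== SOURCE A (Python) =====
-- def ticket(ticketArr, custArr):
--
--     ticketDIct = {}
--
--     for i in custArr:
--         ticketDIct[i] = None
--
--     # decreasing array
--     ticketArr = sorted(ticketArr)[::-1]
--     custArr = sorted(custArr)[::-1]
--
--
--     custIndex = 0
--     ticketIndex = 0
--
--     while custIndex < len(custArr):
--
--         ticketAssigned: bool = False
--
--         while ticketIndex < len(ticketArr):
--
--             if ticketArr[ticketIndex] <= custArr[custIndex]:
--                 ticketDIct[custArr[custIndex]] = ticketArr[ticketIndex]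
--                 ticketIndex += 1
--                 custIndex += 1
--                 ticketAssigned = True
--                 break
--
--             ticketIndex += 1
--
--         if not ticketAssigned:
--             ticketDIct[custArr[custIndex]] = -1
--             custIndex += 1
--
--     return ticketDIct.values()
-- ===== SOURCE B (Python) =====
-- import bisect
--
-- def ticket(ticketArr, custArr):
--     # Idiomatic re-implementation: keep a sorted ascending multiset of tickets and,
--     # for each customer in descending order, binary-search (bisect_right) the highest
--     # affordable ticket and pop it; dict seeded in custArr order fixes the output order.
--     ticketDict = {}
--     for i in custArr:
--         ticketDict[i] = None
--
--     s = sorted(ticketArr)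
--     for c in sorted(custArr)[::-1]:
--         i = bisect.bisect_right(s, c)
--         if i > 0:
--             ticketDict[c] = s.pop(i - 1)
--         else:
--             ticketDict[c] = -1
--     return ticketDict.values()
-- ===== Notes on version B (the rewrite author's own statement) =====
-- stated objective: idiomatic
-- what changed: Replaces the two monotonic index pointers over the descending ticket list with a maintained ascending sorted multiset queried by bisect_right and pop per customer.
import Mathlib
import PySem

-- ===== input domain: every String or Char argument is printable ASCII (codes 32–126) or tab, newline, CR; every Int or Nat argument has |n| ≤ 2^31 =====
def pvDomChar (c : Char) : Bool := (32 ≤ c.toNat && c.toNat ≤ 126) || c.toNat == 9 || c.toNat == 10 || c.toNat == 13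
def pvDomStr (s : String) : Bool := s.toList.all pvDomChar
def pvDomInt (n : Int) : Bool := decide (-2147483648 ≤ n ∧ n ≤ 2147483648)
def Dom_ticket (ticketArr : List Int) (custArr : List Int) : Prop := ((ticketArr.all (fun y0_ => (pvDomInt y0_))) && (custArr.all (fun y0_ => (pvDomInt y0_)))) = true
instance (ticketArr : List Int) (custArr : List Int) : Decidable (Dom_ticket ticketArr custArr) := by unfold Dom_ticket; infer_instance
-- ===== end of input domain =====

-- B replaces A's two monotonic index pointers with a sorted ascending multiset queried by
-- bisect_right and popped per customer (idiomatic; same asymptotic cost, not claimed faster).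

-- ===== PORT A =====
-- inner 'while ticketIndex < len(ticketArr)' loop: scans from index ti for the first ticket ≤ c;
-- returns (that ticket, new ticketIndex) or none when the scan exhausts (ticketIndex ends at len).
def aInner (D : List Int) (c : Int) (ti : Nat) : Option (Int × Nat) :=
  if h : ti < D.length then
    if D[ti] ≤ c then some (D[ti], ti + 1)
    else aInner D c (ti + 1)
  else none
termination_by D.length - ti

-- outer 'while custIndex < len(custArr)' loop over indices, carrying ticketIndex and the dict
def aOuter (D C : List Int) (ci ti : Nat) (d : PySem.Dict Int (Option Int)) : PySem.Dict Int (Option Int) :=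
  if h : ci < C.length then
    match aInner D C[ci] ti with
    | some (t, ti') => aOuter D C (ci + 1) ti' (d.insert C[ci] (some t))
    | none => aOuter D C (ci + 1) D.length (d.insert C[ci] (some (-1)))
  else d
termination_by C.length - ci

def ticket (ticketArr : List Int) (custArr : List Int) : List Int :=
  -- seed: for i in custArr: ticketDIct[i] = None
  let d0 := custArr.foldl (fun d i => d.insert i (none : Option Int)) (PySem.Dict.mk [])
  -- sorted(xs)[::-1] = reverse of the ascending sort (ints: [::-1] is List.reverse)
  let D := (PySem.List.sorted ticketArr (fun x => x)).reverse
  let C := (PySem.List.sorted custArr (fun x => x)).reverse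
  -- every seeded key is overwritten with an int by the loop, so the values are all 'some';
  -- filterMap id extracts them (dict_values of ints → List Int under the type convention)
  ((aOuter D C 0 0 d0).values).filterMap id

-- ===== PORT B =====
-- body of 'for c in sorted(custArr)[::-1]': bisect_right into the sorted multiset, pop or -1
def bStep (sd : List Int × PySem.Dict Int (Option Int)) (c : Int) : List Int × PySem.Dict Int (Option Int) :=
  let i := PySem.List.bisectRight sd.1 c
  if 0 < i then
    match PySem.List.pop? sd.1 ((i : Int) - 1) with
    | some (t, s') => (s', sd.2.insert c (some t))
    | none => (sd.1, sd.2)  -- unreachable: 0 ≤ i-1 < len(s) (Python would raise IndexError)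
  else (sd.1, sd.2.insert c (some (-1)))

def ticket_alt (ticketArr : List Int) (custArr : List Int) : List Int :=
  let d0 := custArr.foldl (fun d i => d.insert i (none : Option Int)) (PySem.Dict.mk [])
  let s := PySem.List.sorted ticketArr (fun x => x)
  let C := (PySem.List.sorted custArr (fun x => x)).reverse
  (((C.foldl bStep (s, d0)).2).values).filterMap id

-- ===== PRECONDITION & SPEC =====
def Spec_ticket (ticketArr : List Int) (custArr : List Int) (out : List Int) : Prop := out = ticket_alt ticketArr custArr
instance (ticketArr : List Int) (custArr : List Int) (out : List Int) : Decidable (Spec_ticket ticketArr custArr out) := by unfold Spec_ticket; infer_instance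

-- ===== CLAIM (what is proved, stated in full; the proofs are below) =====
def Claim_equal_ticket : Prop := ∀ (ticketArr : List Int) (custArr : List Int), Dom_ticket ticketArr custArr → Spec_ticket ticketArr custArr (ticket ticketArr custArr)

-- ===== LEMMAS AND PROOFS =====

lemma aInner_char (D : List Int) (c : Int) : ∀ ti, aInner D c ti =
    match (D.drop ti).dropWhile (fun t => decide (c < t)) with
    | [] => none
    | t :: r => some (t, D.length - r.length) := by
  intro ti
  induction' hn : D.length - ti using Nat.strong_induction_on with n IH generalizing ti
  rw [aInner]
  by_cases h : ti < D.length
  · rw [List.drop_eq_getElem_cons h]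
    simp only [h, dif_pos]
    by_cases hle : D[ti] ≤ c
    · rw [List.dropWhile_cons_of_neg (by simpa using hle)]
      have : D.length - (D.drop (ti+1)).length = ti + 1 := by
        simp [List.length_drop]; omega
      rw [if_pos hle]
      simp only [List.length_drop] at this
      simp [this]
    · rw [List.dropWhile_cons_of_pos (by simpa using not_le.mp hle)]
      rw [if_neg hle]
      exact IH (D.length - (ti+1)) (by omega) (ti+1) rfl
  · simp [h, List.drop_eq_nil_of_le (by omega : D.length ≤ ti)]

-- list-structural form of A's outer loop
def loopA (D : List Int) : List Int → Nat → PySem.Dict Int (Option Int) → PySem.Dict Int (Option Int)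
  | [], _, d => d
  | c :: cs, ti, d =>
    match aInner D c ti with
    | some (t, ti') => loopA D cs ti' (d.insert c (some t))
    | none => loopA D cs D.length (d.insert c (some (-1)))

lemma aOuter_eq_loopA (D C : List Int) : ∀ ci ti d, aOuter D C ci ti d = loopA D (C.drop ci) ti d := by
  intro ci
  induction' hn : C.length - ci using Nat.strong_induction_on with n IH generalizing ci
  intro ti d
  rw [aOuter]
  by_cases h : ci < C.length
  · rw [List.drop_eq_getElem_cons h]
    simp only [h, dif_pos, loopA]
    cases aInner D C[ci] ti with
    | some p => cases p with
      | mk t ti' => exact IH (C.length - (ci+1)) (by omega) (ci+1) rfl ti' _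
    | none => exact IH (C.length - (ci+1)) (by omega) (ci+1) rfl D.length _
  · rw [List.drop_eq_nil_of_le (by omega : C.length ≤ ci)]
    simp [h, loopA]

lemma suffix_drop_eq {α : Type} (D l : List α) (h : l <:+ D) : D.drop (D.length - l.length) = l := by
  obtain ⟨pre, rfl⟩ := h
  simp [List.length_append]

-- on a sorted list, the elements ≤ x are exactly the first bisectRight ones
lemma filter_eq_take_bisect (S : List Int) (x : Int) (hS : S.Pairwise (· ≤ ·)) :
    S.filter (fun t => decide (t ≤ x)) = S.take (PySem.List.bisectRight S x) := by
  obtain ⟨hle, hlt, hgt⟩ := PySem.List.bisectRight_spec S x hS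
  set i := PySem.List.bisectRight S x with hi
  have h1 : (S.take i).filter (fun t => decide (t ≤ x)) = S.take i := by
    apply List.filter_eq_self.mpr
    intro a ha
    obtain ⟨j, hj, rfl⟩ := List.mem_take_iff_getElem.mp ha
    simpa using hlt j (by omega) (by omega)
  have h2 : (S.drop i).filter (fun t => decide (t ≤ x)) = [] := by
    apply List.filter_eq_nil_iff.mpr
    intro a ha
    obtain ⟨j, hj, rfl⟩ := List.mem_iff_getElem.mp ha
    rw [List.getElem_drop]
    simp only [decide_eq_true_eq, not_le]
    have hj' : i + j < S.length := by
      simp only [List.length_drop] at hj; omega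
    exact hgt (i + j) hj' (by omega)
  conv_lhs => rw [← List.take_append_drop i S]
  rw [List.filter_append, h1, h2, List.append_nil]

-- main invariant: A's pointer state and B's multiset state produce the same dict
lemma loopA_eq_foldl (D : List Int) : ∀ (cs S : List Int) (ti : Nat) (d : PySem.Dict Int (Option Int)),
    S.Pairwise (· ≤ ·) →
    cs.Pairwise (fun a b => b ≤ a) →
    (∀ c ∈ cs, S.filter (fun t => decide (t ≤ c)) = ((D.drop ti).filter (fun t => decide (t ≤ c))).reverse) →
    loopA D cs ti d = (cs.foldl bStep (S, d)).2 := by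
  intro cs
  induction cs with
  | nil => intro S ti d _ _ _; rfl
  | cons c cs' IH =>
    intro S ti d hS hC hInv
    have hCle : ∀ c' ∈ cs', c' ≤ c := (List.pairwise_cons.mp hC).1
    have hC' : cs'.Pairwise (fun a b => b ≤ a) := (List.pairwise_cons.mp hC).2
    obtain ⟨hle, hlt, hgt⟩ := PySem.List.bisectRight_spec S c hS
    set i := PySem.List.bisectRight S c with hidef
    have hF : S.filter (fun t => decide (t ≤ c)) = S.take i := filter_eq_take_bisect S c hS
    have hFL : S.filter (fun t => decide (t ≤ c)) = ((D.drop ti).filter (fun t => decide (t ≤ c))).reverse :=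
      hInv c (List.mem_cons_self ..)
    rw [List.foldl_cons, loopA, aInner_char]
    -- decompose the ticket suffix at the first element ≤ c
    rcases hw : (D.drop ti).dropWhile (fun t => decide (c < t)) with _ | ⟨t, r⟩
    · -- no remaining ticket ≤ c : A writes -1 and keeps scanning position; B finds i = 0
      have hnil : (D.drop ti).filter (fun t => decide (t ≤ c)) = [] := by
        apply List.filter_eq_nil_iff.mpr
        intro a ha
        have := List.dropWhile_eq_nil_iff.mp hw a ha
        simpa using this
      have hFnil : S.filter (fun t => decide (t ≤ c)) = [] := by rw [hFL, hnil]; rfl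
      have hi0 : i = 0 := by
        have h := hF.symm.trans hFnil
        rcases List.take_eq_nil_iff.mp h with h | h
        · exact h
        · subst h; simp at hle; exact hle
      have hbs : bStep (S, d) c = (S, d.insert c (some (-1))) := by
        simp [bStep, ← hidef, hi0]
      rw [hbs]
      apply IH S D.length _ hS hC'
      intro c' hc'
      rw [List.drop_length]
      have : S.filter (fun t => decide (t ≤ c')) = [] := by
        apply List.filter_eq_nil_iff.mpr
        intro a ha
        have h1 := List.filter_eq_nil_iff.mp hFnil a ha
        have := hCle c' hc'
        simp at h1 ⊢; omega
      rw [this]; rfl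
    · -- some ticket ≤ c : A assigns the first one from the scan; B pops index i-1
      -- head of the dropWhile fails the predicate: t ≤ c
      have htc : t ≤ c := by
        have := List.head_dropWhile_not (fun t => decide (c < t)) (l := D.drop ti)
          (w := by rw [hw]; simp)
        simp only [hw, List.head_cons, decide_eq_false_iff_not, not_lt] at this
        exact this
      have hsplit : (D.drop ti).filter (fun t => decide (t ≤ c)) = t :: r.filter (fun t => decide (t ≤ c)) := by
        conv_lhs => rw [← List.takeWhile_append_dropWhile (p := fun t => decide (c < t)) (l := D.drop ti)]
        rw [List.filter_append, hw]
        have h1 : (List.takeWhile (fun t => decide (c < t)) (D.drop ti)).filter (fun t => decide (t ≤ c)) = [] := by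
          apply List.filter_eq_nil_iff.mpr
          intro a ha
          have := List.mem_takeWhile_imp ha
          simp at this ⊢; omega
        rw [h1, List.nil_append, List.filter_cons_of_pos (by simpa using htc)]
      -- B side: i > 0, S[i-1] = t
      set L' := r.filter (fun t => decide (t ≤ c)) with hL'
      have hFcat : S.take i = L'.reverse ++ [t] := by
        rw [← hF, hFL, hsplit]; simp
      have hipos : 0 < i := by
        by_contra h0
        have : S.take i = [] := by simp [Nat.eq_zero_of_not_pos h0]
        rw [this] at hFcat; exact absurd hFcat.symm (by simp)
      have hlen : (S.take i).length = i := by simp [List.length_take]; omega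
      have hi1 : i - 1 < S.length := by omega
      have hlenL : (L'.reverse).length = i - 1 := by
        have h := congrArg List.length hFcat
        simp only [List.length_append, List.length_cons, List.length_nil] at h
        omega
      have hSel : S[i-1]'hi1 = t := by
        have h1 : (S.take i)[i-1]'(by omega) = S[i-1]'hi1 := List.getElem_take
        rw [← h1, List.getElem_of_eq hFcat, List.getElem_append_right (by omega)]
        simp [hlenL]
      have hbs : bStep (S, d) c = (S.eraseIdx (i-1), d.insert c (some t)) := by
        have hcast : ((i : Int) - 1) = ((i - 1 : Nat) : Int) := by omega
        have hpop : PySem.List.pop? S ((i : Int) - 1) = some (S[i-1]'hi1, S.eraseIdx (i-1)) := by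
          rw [hcast]; exact PySem.List.pop?_natCast S (i-1) hi1
        simp [bStep, ← hidef, hipos, hpop, hSel]
      rw [hbs]
      -- A side: new scan position is D.length - r.length with D.drop _ = r
      have hr : D.drop (D.length - r.length) = r := by
        apply suffix_drop_eq
        have h1 : t :: r <:+ D.drop ti := hw ▸ List.dropWhile_suffix _
        exact ((List.suffix_cons t r).trans h1).trans (List.drop_suffix ti D)
      apply IH _ _ _ (hS.sublist (List.eraseIdx_sublist ..)) hC'
      intro c' hc'
      have hc'c : c' ≤ c := hCle c' hc'
      rw [hr]
      -- LHS: eraseIdx splits into take (i-1) ++ drop i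
      have herase : S.eraseIdx (i-1) = S.take (i-1) ++ S.drop i := by
        rw [List.eraseIdx_eq_take_drop_succ]
        congr 2
        omega
      rw [herase, List.filter_append]
      have hdrop : (S.drop i).filter (fun t => decide (t ≤ c')) = [] := by
        apply List.filter_eq_nil_iff.mpr
        intro a ha
        obtain ⟨j, hj, rfl⟩ := List.mem_iff_getElem.mp ha
        rw [List.getElem_drop]
        have hj' : i + j < S.length := by simp only [List.length_drop] at hj; omega
        have := hgt (i + j) hj' (by omega)
        simp; omega
      have htake : S.take (i-1) = L'.reverse := by
        have h1 : S.take (i-1) = (S.take i).take (i-1) := by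
          rw [List.take_take]; congr 1; omega
        rw [h1, hFcat, ← hlenL, List.take_left]
      rw [hdrop, htake, List.append_nil, hL', ← List.filter_reverse, List.filter_filter,
        ← List.filter_reverse]
      apply List.filter_congr
      intro x _
      by_cases hx : x ≤ c'
      · simp [hx, le_trans hx hc'c]
      · simp [hx]

-- ===== VERDICT (by name: the statement is the Claim_ definition above) =====
theorem ticket_spec : Claim_equal_ticket := by
  intro ticketArr custArr _
  unfold Spec_ticket ticket ticket_alt
  dsimp only
  have hd : aOuter ((PySem.List.sorted ticketArr (fun x => x)).reverse)
      ((PySem.List.sorted custArr (fun x => x)).reverse) 0 0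
      (List.foldl (fun d i => d.insert i (none : Option Int)) (PySem.Dict.mk []) custArr) =
      (List.foldl bStep (PySem.List.sorted ticketArr (fun x => x),
        List.foldl (fun d i => d.insert i (none : Option Int)) (PySem.Dict.mk []) custArr)
        ((PySem.List.sorted custArr (fun x => x)).reverse)).2 := by
    rw [aOuter_eq_loopA, List.drop_zero]
    apply loopA_eq_foldl
    · exact PySem.List.sorted_pairwise ticketArr (fun x => x)
    · rw [List.pairwise_reverse]
      exact PySem.List.sorted_pairwise custArr (fun x => x)
    · intro c _
      rw [List.drop_zero, List.filter_reverse, List.reverse_reverse]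
  rw [hd]
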